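-- pv_equiv track=rewrite | github.com/SirPoko/Lexer-Poko | lexerPoko.py | msignop
-- ===== SOURCE A (Python) =====
-- ESTADO_FINAL = "ESTADO FINAL"
--
-- ESTADO_NO_FINAL = "NO ACEPTADO"
--
-- ESTADO_TRAMPA = "EN ESTADO TRAMPA"
--
-- def msignop(cadena):
--     estado = 0
--     estados_aceptados = [1]
--     delta = {0:{',':1, ';':1, '#':1}, 1:{}}
--     for caracter in cadena:
--         if caracter in delta[estado].keys():
--             estado = delta[estado][caracter]
--         else:
--             estado = -1
--             break
--     if estado == -1:
--         return ESTADO_TRAMPA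
--     if estado in estados_aceptados:
--         return ESTADO_FINAL
--     else:
--         return ESTADO_NO_FINAL
-- ===== SOURCE B (Python) =====
-- ESTADO_FINAL = "ESTADO FINAL"
-- ESTADO_NO_FINAL = "NO ACEPTADO"
-- ESTADO_TRAMPA = "EN ESTADO TRAMPA"
--
-- def msignop(cadena):
--     if len(cadena) == 0:
--         return ESTADO_NO_FINAL
--     if len(cadena) == 1 and cadena[0] in (',', ';', '#'):
--         return ESTADO_FINAL
--     return ESTADO_TRAMPA
-- ===== Notes on version B (the rewrite author's own statement) =====
-- stated objective: simpler
-- what changed: Replaced the DFA loop with its transition table by a direct length-based case split: empty string is not accepted, a single character from {',', ';', '#'} is final, everything else is trapped.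
import Mathlib
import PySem

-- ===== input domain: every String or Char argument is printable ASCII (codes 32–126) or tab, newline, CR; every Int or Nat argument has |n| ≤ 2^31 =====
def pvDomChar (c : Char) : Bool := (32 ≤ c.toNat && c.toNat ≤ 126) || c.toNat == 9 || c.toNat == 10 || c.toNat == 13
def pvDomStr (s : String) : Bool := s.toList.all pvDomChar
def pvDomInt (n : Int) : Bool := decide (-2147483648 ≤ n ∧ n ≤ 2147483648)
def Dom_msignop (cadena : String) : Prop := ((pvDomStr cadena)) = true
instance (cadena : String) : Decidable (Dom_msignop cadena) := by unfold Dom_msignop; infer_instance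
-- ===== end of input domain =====

-- B replaces A's DFA loop and transition dict by a direct length-based case split (simpler).

-- ===== PORT A =====
-- the DFA loop: delta = {0:{',':1, ';':1, '#':1}, 1:{}}; on a missing key the state
-- becomes -1 and the loop breaks (here: returns -1 immediately, exact since estado
-- stays -1 and the remaining characters are not consumed observably)
def msignopLoop (estado : Int) : List Char → Int
  | [] => estado
  | c :: rest =>
    if estado = 0 ∧ (c = ',' ∨ c = ';' ∨ c = '#') then msignopLoop 1 rest
    else -1

def msignop (cadena : String) : String :=
  let estado := msignopLoop 0 cadena.toList
  if estado = -1 then "EN ESTADO TRAMPA"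
  else if estado = 1 then "ESTADO FINAL"
  else "NO ACEPTADO"

-- ===== PORT B =====
def msignop_alt (cadena : String) : String :=
  match cadena.toList with
  | [] => "NO ACEPTADO"
  | [c] => if c = ',' ∨ c = ';' ∨ c = '#' then "ESTADO FINAL" else "EN ESTADO TRAMPA"
  | _ => "EN ESTADO TRAMPA"

-- ===== PRECONDITION & SPEC =====
def Spec_msignop (cadena : String) (out : String) : Prop := out = msignop_alt cadena
instance (cadena : String) (out : String) : Decidable (Spec_msignop cadena out) := by unfold Spec_msignop; infer_instance

-- ===== CLAIM (what is proved, stated in full; the proofs are below) =====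
def Claim_equal_msignop : Prop := ∀ (cadena : String), Dom_msignop cadena → Spec_msignop cadena (msignop cadena)

-- ===== LEMMAS AND PROOFS =====
-- ===== VERDICT (by name: the statement is the Claim_ definition above) =====
theorem msignop_spec : Claim_equal_msignop := by
  intro cadena _
  unfold Spec_msignop msignop msignop_alt
  cases h : cadena.toList with
  | nil => simp [msignopLoop]
  | cons c rest =>
    cases rest with
    | nil =>
      by_cases hc : c = ',' ∨ c = ';' ∨ c = '#' <;>
        simp [msignopLoop, hc]
    | cons d rest' =>
      by_cases hc : c = ',' ∨ c = ';' ∨ c = '#' <;>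
        simp [msignopLoop, hc]
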